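-- pv_equiv track=rewrite | github.com/Mitesh512/Data-Structure-and-algotirhms | prefix_sum.py | get_negative_profit_days
-- ===== SOURCE A (Python) =====
-- def get_negative_profit_days(profits):
--     cumulative_profit = 0
--     flag_days = []
--
--     for i, prft in enumerate(profits):
--         cumulative_profit += prft
--         if cumulative_profit <0:
--             flag_days.append(i)
--
--     return flag_days
-- ===== SOURCE B (Python) =====
-- def _prefix_sums(profits):
--     totals = []
--     total = 0
--     for p in profits:
--         total += p
--         totals.append(total)
--     return totals
--
--
-- def get_negative_profit_days(profits):
--     return [i for i, s in enumerate(_prefix_sums(profits)) if s < 0]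
-- ===== Notes on version B (the rewrite author's own statement) =====
-- stated objective: alternative
-- what changed: B separates table-building from selection: it first materializes the full prefix-sum list, then a second enumerate-and-filter pass collects the indices with negative totals, instead of A's single loop interleaving the running sum with conditional appends.
import Mathlib
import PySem

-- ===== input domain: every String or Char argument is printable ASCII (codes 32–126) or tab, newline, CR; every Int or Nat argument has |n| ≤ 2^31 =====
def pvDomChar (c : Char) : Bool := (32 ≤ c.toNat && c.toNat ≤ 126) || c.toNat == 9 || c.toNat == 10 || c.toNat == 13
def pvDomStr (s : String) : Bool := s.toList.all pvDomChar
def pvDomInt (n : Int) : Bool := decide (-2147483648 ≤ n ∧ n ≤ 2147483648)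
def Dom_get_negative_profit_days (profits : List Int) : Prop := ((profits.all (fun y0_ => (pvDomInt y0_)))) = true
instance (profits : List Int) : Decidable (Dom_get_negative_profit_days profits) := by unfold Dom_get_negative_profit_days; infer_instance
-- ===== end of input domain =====

-- B separates prefix-sum table building from index selection; A interleaves both in one loop. Objective: alternative decomposition, same cost.

-- ===== PORT A =====
-- one loop over enumerate(profits), carrying (cumulative_profit, flag_days)
def get_negative_profit_days (profits : List Int) : List Int :=
  ((PySem.List.enumerate profits 0).foldl
    (fun st p =>
      let cum := st.1 + p.2
      (cum, if cum < 0 then st.2 ++ [p.1] else st.2))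
    ((0 : Int), ([] : List Int))).2

-- ===== PORT B =====
-- stage 1: materialize the prefix-sum table (Source B's _prefix_sums)
def pvPrefixSums (profits : List Int) : List Int :=
  (profits.foldl (fun st p => (st.1 + p, st.2 ++ [st.1 + p]))
    ((0 : Int), ([] : List Int))).2

-- stage 2: enumerate the table and keep indices with negative totals
def get_negative_profit_days_alt (profits : List Int) : List Int :=
  ((PySem.List.enumerate (pvPrefixSums profits) 0).filter (fun p => p.2 < 0)).map (fun p => p.1)

-- ===== PRECONDITION & SPEC =====
def Spec_get_negative_profit_days (profits : List Int) (out : List Int) : Prop := out = get_negative_profit_days_alt profits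
instance (profits : List Int) (out : List Int) : Decidable (Spec_get_negative_profit_days profits out) := by unfold Spec_get_negative_profit_days; infer_instance

-- ===== CLAIM (what is proved, stated in full; the proofs are below) =====
def Claim_equal_get_negative_profit_days : Prop := ∀ (profits : List Int), Dom_get_negative_profit_days profits → Spec_get_negative_profit_days profits (get_negative_profit_days profits)

-- ===== LEMMAS AND PROOFS =====

-- common recursive characterisation: indices ≥ i where the running sum starting at c goes negative
def pvGo : List Int → Int → Int → List Int
  | [], _, _ => []
  | p :: ps, c, i => (if c + p < 0 then [i] else []) ++ pvGo ps (c + p) (i + 1)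

theorem pvA_go (l : List Int) : ∀ (c : Int) (acc : List Int) (s : Int),
    ((PySem.List.enumerate l s).foldl
      (fun st p =>
        let cum := st.1 + p.2
        (cum, if cum < 0 then st.2 ++ [p.1] else st.2))
      (c, acc)).2 = acc ++ pvGo l c s := by
  induction l with
  | nil => intro c acc s; simp [PySem.List.enumerate_nil, pvGo]
  | cons p ps ih =>
      intro c acc s
      simp only [PySem.List.enumerate_cons, List.foldl_cons, pvGo, ih]
      by_cases h : c + p < 0 <;> simp [h]

-- the raw prefix-sum scan starting from c
def pvScan : List Int → Int → List Int
  | [], _ => []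
  | p :: ps, c => (c + p) :: pvScan ps (c + p)

theorem pvPrefix_scan (l : List Int) : ∀ (c : Int) (ts : List Int),
    (l.foldl (fun st p => (st.1 + p, st.2 ++ [st.1 + p])) (c, ts)).2 = ts ++ pvScan l c := by
  induction l with
  | nil => intro c ts; simp [pvScan]
  | cons p ps ih => intro c ts; simp [pvScan, ih]

theorem pvB_go (l : List Int) : ∀ (c : Int) (s : Int),
    ((PySem.List.enumerate (pvScan l c) s).filter (fun p => p.2 < 0)).map (fun p => p.1)
      = pvGo l c s := by
  induction l with
  | nil => intro c s; simp [pvScan, pvGo, PySem.List.enumerate_nil]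
  | cons p ps ih =>
      intro c s
      simp only [pvScan, PySem.List.enumerate_cons, List.filter_cons, pvGo]
      by_cases h : c + p < 0 <;> simp [h, ih]

-- ===== VERDICT (by name: the statement is the Claim_ definition above) =====
theorem get_negative_profit_days_spec : Claim_equal_get_negative_profit_days := by
  intro profits _
  unfold Spec_get_negative_profit_days get_negative_profit_days get_negative_profit_days_alt pvPrefixSums
  rw [pvA_go, pvPrefix_scan]
  simpa using (pvB_go profits 0 0).symm
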